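-- pv_equiv track=rewrite | github.com/FeryRi/Red-Neuronal-Hopfield-para-reconocer-Figuras | hopfield.py | diagonal_matrix
-- ===== SOURCE A (Python) =====
-- def diagonal_matrix(matriz):
--     result = []
--     for row in range(len(matriz)):
--         new_row = []
--         for element in range(len(matriz[row])):
--             if row == element:
--                 new_row.append(0)
--             else:
--                 new_row.append(matriz[row][element])
--         result.append(new_row)
--     return result
-- ===== SOURCE B (Python) =====
-- def diagonal_matrix(matriz):
--     def zero_at(row, k):
--         # zero the k-th element of a fresh copy of row, by structural recursion
--         if not row:
--             return []
--         if k == 0: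
--             return [0] + row[1:]
--         return [row[0]] + zero_at(row[1:], k - 1)
--
--     def go(rows, i):
--         if not rows:
--             return []
--         return [zero_at(rows[0], i)] + go(rows[1:], i + 1)
--
--     return go(matriz, 0)
-- ===== Notes on version B (the rewrite author's own statement) =====
-- stated objective: alternative
-- what changed: B is a pure structural recursion: a recursive helper zero_at rebuilds each row counting the diagonal position down to zero, driven by a recursive descent over the rows carrying the diagonal index, replacing A's doubly-indexed range loops; it trades speed for a loop-free decomposition.
import Mathlib
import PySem

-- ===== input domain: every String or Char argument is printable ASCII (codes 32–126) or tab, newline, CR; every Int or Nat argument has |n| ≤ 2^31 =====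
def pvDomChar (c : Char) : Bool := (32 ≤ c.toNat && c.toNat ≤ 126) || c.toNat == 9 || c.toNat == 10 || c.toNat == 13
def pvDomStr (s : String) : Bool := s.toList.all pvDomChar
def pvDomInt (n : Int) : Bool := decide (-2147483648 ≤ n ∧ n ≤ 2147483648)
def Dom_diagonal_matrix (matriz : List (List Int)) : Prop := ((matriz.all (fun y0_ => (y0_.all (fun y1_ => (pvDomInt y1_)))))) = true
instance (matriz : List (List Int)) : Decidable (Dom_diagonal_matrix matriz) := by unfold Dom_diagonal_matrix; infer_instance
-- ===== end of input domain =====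

-- B replaces A's doubly-indexed range loops by a pure structural recursion: a recursive
-- helper zeroes the k-th cell of a row by counting down, driven by a recursive descent
-- over the rows carrying the diagonal index: a loop-free decomposition (no speed claim).


-- ===== PORT A =====
def diagonal_matrix (matriz : List (List Int)) : List (List Int) :=
  (PySem.List.pyRange 0 matriz.length 1).foldl (fun result row =>
    result ++ [(PySem.List.pyRange 0 (PySem.List.pyGetD matriz row []).length 1).foldl
      (fun new_row element =>
        new_row ++ [if row == element then (0 : Int)
                    else PySem.List.pyGetD (PySem.List.pyGetD matriz row []) element 0]) []]) []

-- ===== PORT B =====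
-- zero_at: structural recursion on the row, counting k down to zero.
def pvZeroAt : List Int → Int → List Int
  | [], _ => []
  | x :: xs, k => if k == 0 then 0 :: xs else x :: pvZeroAt xs (k - 1)

-- go: recursive descent over the rows, carrying the diagonal index i.
def pvGo : List (List Int) → Int → List (List Int)
  | [], _ => []
  | r :: rs, i => pvZeroAt r i :: pvGo rs (i + 1)

def diagonal_matrix_alt (matriz : List (List Int)) : List (List Int) :=
  pvGo matriz 0

-- ===== PRECONDITION & SPEC =====
def Spec_diagonal_matrix (matriz : List (List Int)) (out : List (List Int)) : Prop := out = diagonal_matrix_alt matriz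
instance (matriz : List (List Int)) (out : List (List Int)) : Decidable (Spec_diagonal_matrix matriz out) := by unfold Spec_diagonal_matrix; infer_instance

-- ===== CLAIM (what is proved, stated in full; the proofs are below) =====
def Claim_equal_diagonal_matrix : Prop := ∀ (matriz : List (List Int)), Dom_diagonal_matrix matriz → Spec_diagonal_matrix matriz (diagonal_matrix matriz)

-- ===== LEMMAS AND PROOFS =====

lemma pvZeroAt_length (r : List Int) (k : Int) : (pvZeroAt r k).length = r.length := by
  induction r generalizing k with
  | nil => rfl
  | cons x xs ih =>
    unfold pvZeroAt
    split_ifs <;> simp [ih]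

lemma pvZeroAt_getElem (r : List Int) (k : Nat) (j : Nat) (hj : j < r.length) :
    (pvZeroAt r (k : Int))[j]'(by rw [pvZeroAt_length]; exact hj)
      = if k = j then 0 else r[j] := by
  induction r generalizing k j with
  | nil => simp at hj
  | cons x xs ih =>
    unfold pvZeroAt
    cases k with
    | zero =>
      simp only [Int.natCast_zero, beq_self_eq_true, if_true]
      cases j with
      | zero => simp
      | succ j => simp
    | succ k =>
      have hne : (((k + 1 : Nat) : Int) == 0) = false := by
        simp only [beq_eq_false_iff_ne]
        omega
      simp only [hne, Bool.false_eq_true, if_false]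
      cases j with
      | zero => simp
      | succ j =>
        have hj' : j < xs.length := by simpa using hj
        have : ((k + 1 : Nat) : Int) - 1 = (k : Int) := by push_cast; ring
        simp only [List.getElem_cons_succ, this]
        rw [ih k j hj']
        simp

lemma pvGo_length (rows : List (List Int)) (i : Int) : (pvGo rows i).length = rows.length := by
  induction rows generalizing i with
  | nil => rfl
  | cons r rs ih => simp [pvGo, ih]

lemma pvGo_getElem (rows : List (List Int)) (i : Nat) (n : Nat) (hn : n < rows.length) :
    (pvGo rows (i : Int))[n]'(by rw [pvGo_length]; exact hn)
      = pvZeroAt rows[n] ((i + n : Nat) : Int) := by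
  induction rows generalizing i n with
  | nil => simp at hn
  | cons r rs ih =>
    cases n with
    | zero => simp [pvGo]
    | succ n =>
      have hn' : n < rs.length := by simpa using hn
      have hcast : (i : Int) + 1 = ((i + 1 : Nat) : Int) := by push_cast; ring
      simp only [pvGo, List.getElem_cons_succ, hcast]
      rw [ih (i + 1) n hn']
      congr 2
      omega

-- A's inner loop on row r with row index k equals pvZeroAt r k.
lemma rowA_eq (r : List Int) (k : Nat) :
    (PySem.List.pyRange 0 (r.length : Int) 1).map
      (fun element => if (k : Int) == element then (0 : Int) else PySem.List.pyGetD r element 0)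
    = pvZeroAt r (k : Int) := by
  rw [PySem.List.pyRange_zero_nat, List.map_map]
  apply List.ext_getElem
  · simp [pvZeroAt_length]
  · intro j hj _
    have hjr : j < r.length := by simpa using hj
    rw [pvZeroAt_getElem r k j hjr]
    by_cases h : k = j <;>
      simp [h, PySem.List.pyGetD_natCast, List.getD, List.getElem?_eq_getElem hjr]

-- ===== VERDICT (by name: the statement is the Claim_ definition above) =====
theorem diagonal_matrix_spec : Claim_equal_diagonal_matrix := by
  intro m _
  unfold Spec_diagonal_matrix diagonal_matrix diagonal_matrix_alt
  rw [PySem.List.foldl_append_singleton_eq_map, List.nil_append,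
      PySem.List.pyRange_zero_nat, List.map_map]
  apply List.ext_getElem
  · simp [pvGo_length]
  · intro n hn _
    have hnm : n < m.length := by simpa using hn
    have hB := pvGo_getElem m 0 n hnm
    simp only [Nat.zero_add, Nat.cast_zero] at hB
    rw [hB]
    simp only [List.getElem_map, List.getElem_range, Function.comp]
    rw [PySem.List.foldl_append_singleton_eq_map, List.nil_append]
    have hget : PySem.List.pyGetD m (n : Int) [] = m[n] := by
      simp [PySem.List.pyGetD_natCast, List.getElem?_eq_getElem hnm]
    rw [hget]
    exact rowA_eq m[n] n
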